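-- pv_equiv track=rewrite | github.com/kth990303/BojCodingTestStudy | 12주차/(P)17686/(P)17686_노유빈_python.py | find_HEAD
-- ===== SOURCE A (Python) =====
-- def find_HEAD(n): # HEAD를 return 하는 함수
--     head = ""
--     for i in range(0,len(list(n))):
--         for j in range(0,len(list(n[i]))):
--             if n[i][j].isdigit()!=True:
--                 head += n[i][j]
--             else:
--                 return head
-- ===== SOURCE B (Python) =====
-- def find_HEAD(n):
--     text = "".join(n)
--     idx = next((i for i, c in enumerate(text) if c.isdigit()), None)
--     if idx is None:
--         return None
--     return text[:idx]
-- ===== Notes on version B (the rewrite author's own statement) =====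
-- stated objective: idiomatic
-- what changed: Replaces the two nested character-accumulation loops (building head one character at a time and returning mid-loop) with a single scan for the first digit's index followed by one slice text[:idx].
import Mathlib
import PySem

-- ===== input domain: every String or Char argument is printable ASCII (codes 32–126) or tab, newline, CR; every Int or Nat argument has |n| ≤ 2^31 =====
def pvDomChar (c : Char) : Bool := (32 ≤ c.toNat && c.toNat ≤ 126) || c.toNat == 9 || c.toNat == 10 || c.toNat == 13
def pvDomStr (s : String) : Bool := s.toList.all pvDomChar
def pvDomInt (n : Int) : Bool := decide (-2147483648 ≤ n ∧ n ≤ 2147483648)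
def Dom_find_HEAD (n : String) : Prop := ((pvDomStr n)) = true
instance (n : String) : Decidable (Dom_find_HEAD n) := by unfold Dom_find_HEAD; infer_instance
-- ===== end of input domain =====

-- B replaces A's nested char-accumulation loops with a find-first-digit-index + slice; objective: idiomatic.

-- ===== PORT A =====
-- A's outer loop over the characters of n, accumulating head; the inner loop over
-- the 1-character string n[i] amounts to one digit test per character.
def find_HEAD_loopA (head : List Char) : List Char → Option String
  | [] => none
  | c :: cs =>
    if PySem.Chars.isdigit c ≠ true then find_HEAD_loopA (head ++ [c]) cs
    else some (String.ofList head)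

def find_HEAD (n : String) : Option String := find_HEAD_loopA [] n.toList

-- ===== PORT B =====
-- "".join(n) over a string is the string itself; scan for first digit index, then slice.
def find_HEAD_alt (n : String) : Option String :=
  match n.toList.findIdx? PySem.Chars.isdigit with
  | none => none
  | some i => some (String.ofList (n.toList.take i))

-- ===== PRECONDITION & SPEC =====
def Spec_find_HEAD (n : String) (out : Option String) : Prop := out = find_HEAD_alt n
instance (n : String) (out : Option String) : Decidable (Spec_find_HEAD n out) := by unfold Spec_find_HEAD; infer_instance

-- ===== CLAIM (what is proved, stated in full; the proofs are below) =====
def Claim_equal_find_HEAD : Prop := ∀ (n : String), Dom_find_HEAD n → Spec_find_HEAD n (find_HEAD n)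

-- ===== LEMMAS AND PROOFS =====
theorem find_HEAD_loopA_eq (cs : List Char) : ∀ (acc : List Char),
    find_HEAD_loopA acc cs =
      match cs.findIdx? PySem.Chars.isdigit with
      | none => none
      | some i => some (String.ofList (acc ++ cs.take i)) := by
  induction cs with
  | nil => intro acc; simp [find_HEAD_loopA]
  | cons c cs ih =>
    intro acc
    by_cases h : PySem.Chars.isdigit c
    · simp [find_HEAD_loopA, h, List.findIdx?_cons]
    · rw [find_HEAD_loopA, if_pos (by simp [h]), ih]
      simp only [List.findIdx?_cons, h, Bool.false_eq_true, if_false]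
      cases cs.findIdx? PySem.Chars.isdigit <;> simp

-- ===== VERDICT (by name: the statement is the Claim_ definition above) =====
theorem find_HEAD_spec : Claim_equal_find_HEAD := by
  intro n _
  unfold Spec_find_HEAD find_HEAD find_HEAD_alt
  have h := find_HEAD_loopA_eq n.toList []
  simpa using h
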